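-- pv_equiv track=rewrite | github.com/jokteur/hpx-dashboard | tools/generate_counternames.py | replace_in_list
-- ===== SOURCE A (Python) =====
-- def replace_in_list(counter_list, replacements):
--     """Replaces the <name> in the list recursively until there is nothing to replace."""
--     new_list = []
--     is_replaced = False
--
--     # Not very efficient, but does the job
--     for name in counter_list:
--         is_replaced_local = False
--         for replacement, replacement_list in replacements.items():
--             if replacement in name:
--                 is_replaced_local = True
--                 is_replaced = True
--                 for to_replace in replacement_list:
--                     new_list.append(name.replace(replacement, to_replace))
--                 break
--
--         if not is_replaced_local:
--             new_list.append(name)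
--
--     if is_replaced:
--         return replace_in_list(new_list, replacements)
--     else:
--         return new_list
-- ===== SOURCE B (Python) =====
-- def replace_in_list(counter_list, replacements):
--     """One pass over the list: each name is expanded to completion by a local
--     depth-first recursion instead of re-scanning the whole list once per round."""
--     def expand(name):
--         for replacement, replacement_list in replacements.items():
--             if replacement in name:
--                 out = []
--                 for to_replace in replacement_list:
--                     out.extend(expand(name.replace(replacement, to_replace)))
--                 return out
--         return [name]
--     result = []
--     for name in counter_list:
--         result.extend(expand(name))
--     return result
-- ===== Notes on version B (the rewrite author's own statement) =====
-- stated objective: faster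
-- what changed: A rebuilds and re-scans the entire list once per replacement round and recurses on the whole list; B makes a single pass over the list and expands each name to completion with a local depth-first recursion, so already-finished names are never re-scanned.
-- outside the precondition, e.g. on replace_in_list(['ab'], {'ab': ['ba']}): A returns ['ba'], B returns ['ba']
import Mathlib
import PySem

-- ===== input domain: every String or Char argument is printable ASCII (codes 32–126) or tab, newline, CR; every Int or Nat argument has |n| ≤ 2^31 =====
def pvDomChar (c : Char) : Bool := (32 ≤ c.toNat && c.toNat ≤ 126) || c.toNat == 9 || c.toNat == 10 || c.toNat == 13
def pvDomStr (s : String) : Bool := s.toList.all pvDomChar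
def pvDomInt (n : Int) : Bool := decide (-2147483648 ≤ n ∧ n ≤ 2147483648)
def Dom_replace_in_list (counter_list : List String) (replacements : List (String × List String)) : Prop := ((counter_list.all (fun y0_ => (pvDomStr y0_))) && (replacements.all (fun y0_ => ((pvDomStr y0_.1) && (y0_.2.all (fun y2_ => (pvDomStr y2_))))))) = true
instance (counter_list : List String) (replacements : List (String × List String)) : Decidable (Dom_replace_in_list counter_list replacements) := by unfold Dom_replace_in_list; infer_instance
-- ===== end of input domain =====

-- B replaces A's repeated whole-list passes by a single pass that expands each name to
-- completion with a local depth-first recursion (objective: faster scan structure).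
-- ===== PORT A =====
-- inner `for replacement, replacement_list in replacements.items(): if replacement in name: …; break`
def stepA (replacements : List (String × List String)) (name : String) : Option (List String) :=
  match replacements with
  | [] => none
  | (k, vs) :: rest =>
      if PySem.Str.isIn k name then some (vs.map (fun v => PySem.Str.replace name k v))
      else stepA rest name

-- the `for name in counter_list` loop building (new_list, is_replaced)
def passA (counter_list : List String) (replacements : List (String × List String)) :
    List String × Bool :=
  counter_list.foldl
    (fun st name =>
      match stepA replacements name with
      | some l => (st.1 ++ l, true)
      | none => (st.1 ++ [name], st.2))
    ([], false)

-- the tail recursion `if is_replaced: return replace_in_list(new_list, replacements)`;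
-- the fuel only makes the (possibly non-terminating) Python recursion total — under
-- Pre_ it is proved sufficient and is never exhausted
def goA : Nat → List String → List (String × List String) → List String
  | 0, counter_list, _ => counter_list
  | fuel + 1, counter_list, replacements =>
      let p := passA counter_list replacements
      if p.2 then goA fuel p.1 replacements else p.1

def pvMaxLen (counter_list : List String) : Nat :=
  counter_list.foldr (fun s m => max s.toList.length m) 0

def replace_in_list (counter_list : List String) (replacements : List (String × List String)) : List String :=
  goA (pvMaxLen counter_list + 1) counter_list replacements

-- ===== PORT B =====
-- first matching (replacement, replacement_list) pair of `expand`'s scan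
def firstMatchB (replacements : List (String × List String)) (name : String) :
    Option (String × List String) :=
  match replacements with
  | [] => none
  | (k, vs) :: rest =>
      if PySem.Str.isIn k name then some (k, vs) else firstMatchB rest name

-- `expand`: depth-first expansion of one name to completion (fuel = totality guard,
-- proved sufficient under Pre_)
def expandB (replacements : List (String × List String)) : Nat → String → List String
  | 0, name => [name]
  | fuel + 1, name =>
      match firstMatchB replacements name with
      | some (k, vs) => vs.flatMap (fun v => expandB replacements fuel (PySem.Str.replace name k v))
      | none => [name]

def replace_in_list_alt (counter_list : List String) (replacements : List (String × List String)) : List String :=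
  counter_list.flatMap (fun n => expandB replacements (n.toList.length + 1) n)

-- ===== PRECONDITION & SPEC =====
-- Pre_ excludes the replacement tables on which A's recursion can rewrite forever (e.g.
-- {'a': ['aa']}, where A hits RecursionError and B loops too): it keeps inputs where no key
-- occurs in any name, or every value is strictly shorter than its key, or every key carries
-- a marker character that appears in no value (the repository's '<name>' placeholders);
-- being closed-form, these termination conditions also set aside some terminating tables
-- (e.g. {'ab': ['ba']}), on which A and B agree.
def Pre_replace_in_list (counter_list : List String) (replacements : List (String × List String)) : Prop :=
  (∀ n ∈ counter_list, ∀ q ∈ replacements, PySem.Str.isIn q.1 n = false)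
  ∨ (∀ q ∈ replacements, ∀ v ∈ q.2, v.toList.length < q.1.toList.length)
  ∨ (∀ q ∈ replacements, ∃ c ∈ q.1.toList, ∀ q' ∈ replacements, ∀ v ∈ q'.2, c ∉ v.toList)

instance (counter_list : List String) (replacements : List (String × List String)) : Decidable (Pre_replace_in_list counter_list replacements) := by
  unfold Pre_replace_in_list; infer_instance

def pvWitness_replace_in_list : List String × (List (String × List String)) :=
  (["a<p>b"], [("<p>", ["xy"])])

def Spec_replace_in_list (counter_list : List String) (replacements : List (String × List String)) (out : List String) : Prop := out = replace_in_list_alt counter_list replacements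
instance (counter_list : List String) (replacements : List (String × List String)) (out : List String) : Decidable (Spec_replace_in_list counter_list replacements out) := by unfold Spec_replace_in_list; infer_instance

-- ===== CLAIM (what is proved, stated in full; the proofs are below) =====
def Claim_equal_replace_in_list : Prop := ∀ (counter_list : List String) (replacements : List (String × List String)), Dom_replace_in_list counter_list replacements → Pre_replace_in_list counter_list replacements → Spec_replace_in_list counter_list replacements (replace_in_list counter_list replacements)

-- ===== LEMMAS AND PROOFS =====

-- weight of a string: number of characters satisfying p (the termination measure;
-- p = always-true gives the length measure, p = "marker char" gives the marker count)
def wt (p : Char → Bool) (l : List Char) : Nat := l.countP p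

theorem wt_le_len (p : Char → Bool) (l : List Char) : wt p l ≤ l.length :=
  List.countP_le_length

-- weight bookkeeping for PySem.Chars.replace.go (the scanner behind str.replace)
theorem go_wt_le (p : Char → Bool) (old new : List Char)
    (h : wt p new ≤ wt p old) (h0 : old ≠ []) :
    ∀ fuel l acc, l.length ≤ fuel →
      wt p (PySem.Chars.replace.go old new fuel l acc) ≤ wt p acc + wt p l := by
  intro fuel
  induction fuel with
  | zero =>
      intro l acc hl
      have : l = [] := List.length_eq_zero_iff.mp (Nat.le_zero.mp hl)
      subst this
      simp [PySem.Chars.replace.go, wt]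
  | succ f ih =>
      intro l acc hl
      cases l with
      | nil => simp [PySem.Chars.replace.go, wt]
      | cons c t =>
          have hct : (c :: t).length = t.length + 1 := by simp
          have hlen : 1 ≤ old.length := List.length_pos_of_ne_nil h0
          by_cases hp : old.isPrefixOf (c :: t)
          · have hpre : old <+: (c :: t) := List.isPrefixOf_iff_prefix.mp hp
            have hol : old.length ≤ (c :: t).length := hpre.length_le
            have hsplit : wt p (c :: t) = wt p old + wt p (List.drop old.length (c :: t)) := by
              conv_lhs => rw [← List.take_append_drop old.length (c :: t)]
              rw [show List.take old.length (c :: t) = old from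
                (List.prefix_iff_eq_take.mp hpre).symm]
              simp [wt, List.countP_append]
            have h1 : (List.drop old.length (c :: t)).length ≤ f := by
              rw [List.length_drop]; omega
            have hih := ih (List.drop old.length (c :: t)) (new.reverse ++ acc) h1
            have hra : wt p (new.reverse ++ acc) = wt p new + wt p acc := by
              simp [wt, List.countP_append, List.countP_reverse]
            rw [hra] at hih
            simp only [PySem.Chars.replace.go, hp, if_pos]
            omega
          · have hih := ih t (c :: acc) (by omega)
            simp only [PySem.Chars.replace.go, hp, Bool.false_eq_true, if_false]
            simp only [wt, List.countP_cons] at *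
            by_cases hpc : p c = true <;> simp [hpc] at * <;> omega

theorem go_wt_lt (p : Char → Bool) (old new : List Char) (h : wt p new < wt p old) :
    ∀ fuel l acc, l.length ≤ fuel → (∃ j, old <+: l.drop j) →
      wt p (PySem.Chars.replace.go old new fuel l acc) < wt p acc + wt p l := by
  have h0 : old ≠ [] := by
    intro he; subst he; simp [wt] at h
  have hlen : 1 ≤ old.length := List.length_pos_of_ne_nil h0
  intro fuel
  induction fuel with
  | zero =>
      intro l acc hl hocc
      have : l = [] := List.length_eq_zero_iff.mp (Nat.le_zero.mp hl)
      subst this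
      obtain ⟨j, hj⟩ := hocc
      simp at hj
      exact absurd hj h0
  | succ f ih =>
      intro l acc hl hocc
      cases l with
      | nil =>
          obtain ⟨j, hj⟩ := hocc
          simp at hj
          exact absurd hj h0
      | cons c t =>
          have hct : (c :: t).length = t.length + 1 := by simp
          by_cases hp : old.isPrefixOf (c :: t)
          · have hpre : old <+: (c :: t) := List.isPrefixOf_iff_prefix.mp hp
            have hol : old.length ≤ (c :: t).length := hpre.length_le
            have hsplit : wt p (c :: t) = wt p old + wt p (List.drop old.length (c :: t)) := by
              conv_lhs => rw [← List.take_append_drop old.length (c :: t)]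
              rw [show List.take old.length (c :: t) = old from
                (List.prefix_iff_eq_take.mp hpre).symm]
              simp [wt, List.countP_append]
            have h1 : (List.drop old.length (c :: t)).length ≤ f := by
              rw [List.length_drop]; omega
            have hih := go_wt_le p old new (Nat.le_of_lt h) h0 f
              (List.drop old.length (c :: t)) (new.reverse ++ acc) h1
            have hra : wt p (new.reverse ++ acc) = wt p new + wt p acc := by
              simp [wt, List.countP_append, List.countP_reverse]
            rw [hra] at hih
            simp only [PySem.Chars.replace.go, hp, if_pos]
            omega
          · obtain ⟨j, hj⟩ := hocc
            have hocc' : ∃ j, old <+: t.drop j := by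
              cases j with
              | zero =>
                  exfalso
                  exact hp (List.isPrefixOf_iff_prefix.mpr (by simpa using hj))
              | succ j' => exact ⟨j', by simpa using hj⟩
            have hih := ih t (c :: acc) (by omega) hocc'
            simp only [PySem.Chars.replace.go, hp, Bool.false_eq_true, if_false]
            simp only [wt, List.countP_cons] at *
            by_cases hpc : p c = true <;> simp [hpc] at * <;> omega

-- a replacement whose value has strictly smaller weight than its key strictly
-- decreases the weight of the string
theorem replace_wt_lt (p : Char → Bool) (s old new : String)
    (h : wt p new.toList < wt p old.toList)
    (hin : PySem.Str.isIn old s = true) :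
    wt p (PySem.Str.replace s old new).toList < wt p s.toList := by
  have h0 : old.toList ≠ [] := by
    intro he; rw [he] at h; simp [wt] at h
  have hin' : PySem.Chars.isIn old.toList s.toList = true := by simpa using hin
  have hocc : ∃ j, old.toList <+: s.toList.drop j :=
    (PySem.Chars.exists_prefix_drop_iff_isIn _ _).mpr hin'
  have hbr : (PySem.Str.replace s old new).toList
      = PySem.Chars.replace s.toList old.toList new.toList := by simp
  rw [hbr]
  unfold PySem.Chars.replace
  rw [if_neg (by simpa [List.isEmpty_iff] using h0)]
  have := go_wt_lt p old.toList new.toList h s.toList.length s.toList [] le_rfl hocc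
  simpa [wt] using this

-- the canonical per-name expansion (B's expand at its own fuel)
def EB (replacements : List (String × List String)) (n : String) : List String :=
  expandB replacements (n.toList.length + 1) n

-- first-match bookkeeping
theorem firstMatchB_spec (replacements : List (String × List String)) (name k : String)
    (vs : List String) (hm : firstMatchB replacements name = some (k, vs)) :
    (k, vs) ∈ replacements ∧ PySem.Str.isIn k name = true := by
  induction replacements with
  | nil => simp [firstMatchB] at hm
  | cons p rest ih =>
      obtain ⟨k', vs'⟩ := p
      by_cases hin : PySem.Str.isIn k' name
      · simp only [firstMatchB] at hm
        rw [if_pos hin] at hm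
        obtain ⟨h1, h2⟩ := Prod.mk.injEq .. ▸ Option.some.inj hm
        subst h1; subst h2
        exact ⟨List.mem_cons_self .., hin⟩
      · simp only [firstMatchB] at hm
        rw [if_neg hin] at hm
        obtain ⟨h1, h2⟩ := ih hm
        exact ⟨List.mem_cons_of_mem _ h1, h2⟩

theorem step_eq (replacements : List (String × List String)) (name : String) :
    stepA replacements name
      = (firstMatchB replacements name).map
          (fun p => p.2.map (fun v => PySem.Str.replace name p.1 v)) := by
  induction replacements with
  | nil => simp [stepA, firstMatchB]
  | cons p rest ih =>
      obtain ⟨k, vs⟩ := p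
      by_cases hin : PySem.Str.isIn k name
      · simp only [stepA, firstMatchB]
        rw [if_pos hin, if_pos hin]
        rfl
      · simp only [stepA, firstMatchB]
        rw [if_neg hin, if_neg hin]
        exact ih

-- the per-entry weight-decrease hypothesis extracted from Pre_'s two non-trivial disjuncts
def Shrinks (p : Char → Bool) (replacements : List (String × List String)) : Prop :=
  ∀ q ∈ replacements, ∀ v ∈ q.2, wt p v.toList < wt p q.1.toList

-- under Shrinks every expansion child has strictly smaller weight
theorem child_wt (p : Char → Bool) (replacements : List (String × List String))
    (Hs : Shrinks p replacements)
    (name k : String) (vs : List String)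
    (hm : firstMatchB replacements name = some (k, vs)) (v : String) (hv : v ∈ vs) :
    wt p (PySem.Str.replace name k v).toList < wt p name.toList := by
  obtain ⟨hmem, hin⟩ := firstMatchB_spec replacements name k vs hm
  exact replace_wt_lt p name k v (Hs (k, vs) hmem v hv) hin

theorem expandB_congr (p : Char → Bool) (replacements : List (String × List String))
    (Hs : Shrinks p replacements) :
    ∀ N name f g, wt p name.toList < N → wt p name.toList < f →
      wt p name.toList < g →
      expandB replacements f name = expandB replacements g name := by
  intro N
  induction N with
  | zero => intro name f g hN; omega
  | succ N ih =>
      intro name f g hN hf hg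
      obtain ⟨f', rfl⟩ : ∃ f', f = f' + 1 := ⟨f - 1, by omega⟩
      obtain ⟨g', rfl⟩ : ∃ g', g = g' + 1 := ⟨g - 1, by omega⟩
      simp only [expandB]
      cases hm : firstMatchB replacements name with
      | none => rfl
      | some q =>
          obtain ⟨k, vs⟩ := q
          refine List.flatMap_congr (fun v hv => ?_)
          have hc := child_wt p replacements Hs name k vs hm v hv
          exact ih (PySem.Str.replace name k v) f' g' (by omega) (by omega) (by omega)

theorem EB_step (p : Char → Bool) (replacements : List (String × List String))
    (Hs : Shrinks p replacements) (name : String) :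
    EB replacements name
      = match firstMatchB replacements name with
        | some (k, vs) =>
            vs.flatMap (fun v => EB replacements (PySem.Str.replace name k v))
        | none => [name] := by
  unfold EB
  simp only [expandB]
  cases hm : firstMatchB replacements name with
  | none => rfl
  | some q =>
      obtain ⟨k, vs⟩ := q
      refine List.flatMap_congr (fun v hv => ?_)
      have hc := child_wt p replacements Hs name k vs hm v hv
      have hw : wt p name.toList ≤ name.toList.length := wt_le_len p _
      have hw' : wt p (PySem.Str.replace name k v).toList
          ≤ (PySem.Str.replace name k v).toList.length := wt_le_len p _
      exact expandB_congr p replacements Hs (wt p name.toList)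
        (PySem.Str.replace name k v) name.toList.length
        ((PySem.Str.replace name k v).toList.length + 1) hc (by omega) (by omega)

theorem firstMatchB_none (replacements : List (String × List String)) (name : String)
    (h : ∀ q ∈ replacements, PySem.Str.isIn q.1 name = false) :
    firstMatchB replacements name = none := by
  induction replacements with
  | nil => rfl
  | cons q rest ih =>
      obtain ⟨k, vs⟩ := q
      have hk := h (k, vs) (List.mem_cons_self ..)
      simp only [firstMatchB, hk, Bool.false_eq_true, if_false]
      exact ih (fun q' hq => h q' (List.mem_cons_of_mem _ hq))

theorem EB_unmatched (replacements : List (String × List String)) (name : String)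
    (hm : firstMatchB replacements name = none) : EB replacements name = [name] := by
  unfold EB
  simp [expandB, hm]

-- children-or-self of one name under A's step
def cOS (replacements : List (String × List String)) (n : String) : List String :=
  match stepA replacements n with
  | some l => l
  | none => [n]

theorem passA_spec (replacements : List (String × List String)) :
    ∀ (L : List String) (acc : List String) (b : Bool),
      L.foldl
        (fun st name =>
          match stepA replacements name with
          | some l => (st.1 ++ l, true)
          | none => (st.1 ++ [name], st.2))
        (acc, b)
      = (acc ++ L.flatMap (cOS replacements),
          b || L.any (fun n => (stepA replacements n).isSome)) := by
  intro L
  induction L with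
  | nil => simp
  | cons n t ih =>
      intro acc b
      cases hs : stepA replacements n with
      | none => simp [List.foldl_cons, hs, ih, cOS]
      | some l => simp [List.foldl_cons, hs, ih, cOS]

-- pass-count measure: 0 for a name no key matches, weight + 1 otherwise
def Hm (p : Char → Bool) (replacements : List (String × List String)) (n : String) : Nat :=
  match firstMatchB replacements n with
  | none => 0
  | some _ => wt p n.toList + 1

def HL (p : Char → Bool) (replacements : List (String × List String)) (L : List String) : Nat :=
  L.foldr (fun n m => max (Hm p replacements n) m) 0

theorem Hm_none (p : Char → Bool) (replacements : List (String × List String)) (n : String)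
    (h : firstMatchB replacements n = none) : Hm p replacements n = 0 := by
  unfold Hm; rw [h]

theorem Hm_some (p : Char → Bool) (replacements : List (String × List String)) (n : String)
    (q : String × List String) (h : firstMatchB replacements n = some q) :
    Hm p replacements n = wt p n.toList + 1 := by
  unfold Hm; rw [h]

theorem Hm_le_HL (p : Char → Bool) (replacements : List (String × List String))
    (L : List String) (n : String) (hn : n ∈ L) :
    Hm p replacements n ≤ HL p replacements L := by
  induction L with
  | nil => cases hn
  | cons m t ih =>
      rcases List.mem_cons.mp hn with h | h
      · subst h; simp [HL]
      · have := ih h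
        simp only [HL, List.foldr_cons] at *
        omega

theorem HL_le (p : Char → Bool) (replacements : List (String × List String))
    (L : List String) (B : Nat)
    (h : ∀ n ∈ L, Hm p replacements n ≤ B) : HL p replacements L ≤ B := by
  induction L with
  | nil => simp [HL]
  | cons m t ih =>
      have h1 := h m (List.mem_cons_self ..)
      have h2 := ih (fun n hn => h n (List.mem_cons_of_mem _ hn))
      simp only [HL, List.foldr_cons] at *
      omega

theorem Hm_le_len (p : Char → Bool) (replacements : List (String × List String)) (n : String) :
    Hm p replacements n ≤ n.toList.length + 1 := by
  unfold Hm
  have h := wt_le_len p n.toList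
  cases firstMatchB replacements n with
  | none => simp
  | some q => simp only []; omega

theorem len_le_maxLen (L : List String) (n : String) (hn : n ∈ L) :
    n.toList.length ≤ pvMaxLen L := by
  induction L with
  | nil => cases hn
  | cons m t ih =>
      rcases List.mem_cons.mp hn with h | h
      · subst h; simp [pvMaxLen]
      · have := ih h
        simp only [pvMaxLen, List.foldr_cons] at *
        omega

theorem flatMap_EB_cOS (p : Char → Bool) (replacements : List (String × List String))
    (Hs : Shrinks p replacements) (n : String) :
    (cOS replacements n).flatMap (EB replacements) = EB replacements n := by
  unfold cOS
  rw [step_eq]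
  cases hm : firstMatchB replacements n with
  | none => simp [EB_unmatched replacements n hm]
  | some q =>
      obtain ⟨k, vs⟩ := q
      rw [EB_step p replacements Hs n, hm]
      simp [List.flatMap_map]

theorem goA_eq (p : Char → Bool) (replacements : List (String × List String))
    (Hs : Shrinks p replacements) :
    ∀ fuel L, HL p replacements L ≤ fuel →
      goA fuel L replacements = L.flatMap (EB replacements) := by
  intro fuel
  induction fuel with
  | zero =>
      intro L hfuel
      have hall : ∀ n ∈ L, firstMatchB replacements n = none := by
        intro n hn
        have hle := Hm_le_HL p replacements L n hn
        cases hm : firstMatchB replacements n with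
        | none => rfl
        | some q =>
            rw [Hm_some p replacements n q hm] at hle
            omega
      have : L.flatMap (EB replacements) = L.flatMap (fun n => [n]) :=
        List.flatMap_congr (fun n hn => EB_unmatched replacements n (hall n hn))
      simp [goA, this]
  | succ f ih =>
      intro L hfuel
      show (let q := passA L replacements;
            if q.2 then goA f q.1 replacements else q.1) = L.flatMap (EB replacements)
      rw [show passA L replacements
            = (L.flatMap (cOS replacements),
                false || L.any (fun n => (stepA replacements n).isSome)) from
          passA_spec replacements L [] false]
      simp only [Bool.false_or]
      cases hany : L.any (fun n => (stepA replacements n).isSome) with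
      | false =>
          have hall : ∀ n ∈ L, stepA replacements n = none := by
            intro n hn
            have := (List.any_eq_false.mp hany) n hn
            cases hs : stepA replacements n with
            | none => rfl
            | some l => rw [hs] at this; simp at this
          simp only [if_false, Bool.false_eq_true]
          have h1 : L.flatMap (cOS replacements) = L.flatMap (fun n => [n]) :=
            List.flatMap_congr (fun n hn => by unfold cOS; rw [hall n hn])
          have h2 : L.flatMap (EB replacements) = L.flatMap (fun n => [n]) :=
            List.flatMap_congr (fun n hn => by
              refine EB_unmatched replacements n ?_
              have := step_eq replacements n
              rw [hall n hn] at this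
              cases hm : firstMatchB replacements n with
              | none => rfl
              | some q => rw [hm] at this; simp at this)
          simp [h1, h2]
      | true =>
          simp only [if_true]
          have hnext : HL p replacements (L.flatMap (cOS replacements)) ≤ f := by
            refine HL_le p replacements _ f ?_
            intro m hm
            obtain ⟨n, hn, hmn⟩ := List.mem_flatMap.mp hm
            have hHn := Hm_le_HL p replacements L n hn
            unfold cOS at hmn
            rw [step_eq] at hmn
            cases hfm : firstMatchB replacements n with
            | none =>
                rw [hfm] at hmn
                simp at hmn
                subst hmn
                rw [Hm_none p replacements m hfm]
                omega
            | some q =>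
                obtain ⟨k, vs⟩ := q
                rw [hfm] at hmn
                simp at hmn
                obtain ⟨v, hv, rfl⟩ := hmn
                have hc := child_wt p replacements Hs n k vs hfm v hv
                have hHn' := Hm_some p replacements n (k, vs) hfm
                have hHm : Hm p replacements (PySem.Str.replace n k v)
                    ≤ wt p (PySem.Str.replace n k v).toList + 1 := by
                  unfold Hm
                  cases firstMatchB replacements (PySem.Str.replace n k v) <;> simp
                omega
          rw [ih (L.flatMap (cOS replacements)) hnext]
          rw [List.flatMap_assoc]
          exact List.flatMap_congr (fun n _ => flatMap_EB_cOS p replacements Hs n)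

-- A = B whenever some p makes every replacement weight-decreasing
theorem equal_of_shrinks (p : Char → Bool) (counter_list : List String)
    (replacements : List (String × List String)) (Hs : Shrinks p replacements) :
    replace_in_list counter_list replacements
      = replace_in_list_alt counter_list replacements := by
  have halt : replace_in_list_alt counter_list replacements
      = counter_list.flatMap (EB replacements) := rfl
  have hHL : HL p replacements counter_list ≤ pvMaxLen counter_list + 1 := by
    refine HL_le p replacements _ _ ?_
    intro n hn
    have := Hm_le_len p replacements n
    have := len_le_maxLen counter_list n hn
    omega
  rw [halt, show replace_in_list counter_list replacements
      = goA (pvMaxLen counter_list + 1) counter_list replacements from rfl]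
  exact goA_eq p replacements Hs (pvMaxLen counter_list + 1) counter_list hHL

-- ===== VERDICT (by name: the statement is the Claim_ definition above) =====
theorem replace_in_list_spec : Claim_equal_replace_in_list := by
  intro counter_list replacements hDom hPre
  show replace_in_list counter_list replacements
      = replace_in_list_alt counter_list replacements
  rcases hPre with h1 | h2 | h3
  · -- no key occurs in any name: one pass, nothing replaced
    have hstep : ∀ n ∈ counter_list, stepA replacements n = none := by
      intro n hn
      rw [step_eq, firstMatchB_none replacements n (fun q hq => h1 n hn q hq)]
      rfl
    have hfm : ∀ n ∈ counter_list, firstMatchB replacements n = none := by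
      intro n hn
      exact firstMatchB_none replacements n (fun q hq => h1 n hn q hq)
    show goA (pvMaxLen counter_list + 1) counter_list replacements = _
    show (let q := passA counter_list replacements;
          if q.2 then goA (pvMaxLen counter_list) q.1 replacements else q.1) = _
    rw [show passA counter_list replacements
          = (counter_list.flatMap (cOS replacements),
              false || counter_list.any (fun n => (stepA replacements n).isSome)) from
        passA_spec replacements counter_list [] false]
    have hany : counter_list.any (fun n => (stepA replacements n).isSome) = false := by
      rw [List.any_eq_false]
      intro n hn
      rw [hstep n hn]
      simp
    have h1' : counter_list.flatMap (cOS replacements)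
        = counter_list.flatMap (fun n => [n]) :=
      List.flatMap_congr (fun n hn => by unfold cOS; rw [hstep n hn])
    have h2' : counter_list.flatMap (EB replacements)
        = counter_list.flatMap (fun n => [n]) :=
      List.flatMap_congr (fun n hn => EB_unmatched replacements n (hfm n hn))
    have halt : replace_in_list_alt counter_list replacements
        = counter_list.flatMap (EB replacements) := rfl
    simp [hany, h1', halt, h2']
  · -- strictly shorter values: the length measure decreases
    refine equal_of_shrinks (fun _ => true) counter_list replacements ?_
    intro q hq v hv
    have := h2 q hq v hv
    simpa [wt, List.countP_true] using this
  · -- marker characters: count of chars occurring in no value decreases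
    refine equal_of_shrinks
      (fun c => replacements.all (fun q => q.2.all (fun v => !(v.toList.contains c))))
      counter_list replacements ?_
    intro q hq v hv
    obtain ⟨c, hck, hcnone⟩ := h3 q hq
    have hpos : 0 < wt (fun c => replacements.all
        (fun q => q.2.all (fun v => !(v.toList.contains c)))) q.1.toList := by
      rw [wt, List.countP_pos_iff]
      refine ⟨c, hck, ?_⟩
      rw [List.all_eq_true]
      intro q' hq'
      rw [List.all_eq_true]
      intro v' hv'
      simp [List.contains_eq_mem, hcnone q' hq' v' hv']
    have hzero : wt (fun c => replacements.all
        (fun q => q.2.all (fun v => !(v.toList.contains c)))) v.toList = 0 := by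
      rw [wt, List.countP_eq_zero]
      intro c' hc' hall
      have h1 := (List.all_eq_true.mp hall) q hq
      have h2 := (List.all_eq_true.mp h1) v hv
      simp [List.contains_eq_mem, hc'] at h2
    omega
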